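-- pv_equiv track=rewrite | github.com/DonghunCha/appguard-ios | Protector/ClassObfuscator.py | is_valid_bytes
-- ===== SOURCE A (Python) =====
-- def is_valid_bytes(bClassname):
--     if bClassname == None:
--         return False
--
--     for byte in bClassname:
--         if (65 <= byte and byte <= 90) or (97 <= byte and byte <= 122) or (48 <= byte and byte <= 57) or (byte == 95):
--             continue
--         else:
--             return False
--     return True
-- ===== SOURCE B (Python) =====
-- # Sorted interval-boundary table: [48,58) digits, [65,91) uppercase, [95,96) underscore, [97,123) lowercase.
-- _BOUNDS = (48, 58, 65, 91, 95, 96, 97, 123)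
--
-- def _rank(x):
--     # number of interval boundaries <= x
--     r = 0
--     for t in _BOUNDS:
--         if t <= x:
--             r += 1
--     return r
--
-- def is_valid_bytes(bClassname):
--     if bClassname is None:
--         return False
--     # x lies inside one of the half-open valid intervals iff its rank is odd
--     return all(_rank(b) % 2 == 1 for b in bClassname)
-- ===== Notes on version B (the rewrite author's own statement) =====
-- stated objective: alternative
-- what changed: Replaces A's per-byte early-return chain of inline range comparisons with a sorted interval-boundary table: a byte's rank (number of boundaries <= it) is computed by an accumulator loop and the byte is valid iff that rank is odd.
import Mathlib
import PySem

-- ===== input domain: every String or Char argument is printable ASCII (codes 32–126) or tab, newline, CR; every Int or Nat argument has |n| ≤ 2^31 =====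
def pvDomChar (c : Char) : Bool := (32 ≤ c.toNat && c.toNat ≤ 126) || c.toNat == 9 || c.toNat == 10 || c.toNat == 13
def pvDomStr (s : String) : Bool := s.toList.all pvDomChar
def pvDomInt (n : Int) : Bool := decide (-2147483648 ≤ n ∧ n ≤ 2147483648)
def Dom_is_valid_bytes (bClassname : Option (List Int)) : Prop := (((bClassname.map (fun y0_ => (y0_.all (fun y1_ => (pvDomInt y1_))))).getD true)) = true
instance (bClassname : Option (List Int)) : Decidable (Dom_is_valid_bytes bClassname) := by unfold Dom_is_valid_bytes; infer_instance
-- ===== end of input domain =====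

-- B replaces A's chain of inline range comparisons with a sorted interval-boundary
-- table and a boundary-count parity test (valid iff the rank is odd) — objective: alternative.

-- ===== PORT A =====
def isValidLoop : List Int → Bool
  | [] => true
  | byte :: rest =>
    if (65 ≤ byte && byte ≤ 90) || (97 ≤ byte && byte ≤ 122) || (48 ≤ byte && byte ≤ 57) || (byte == 95) then
      isValidLoop rest
    else
      false

def is_valid_bytes (bClassname : Option (List Int)) : Bool :=
  match bClassname with
  | none => false
  | some bs => isValidLoop bs

-- ===== PORT B =====
-- _BOUNDS = (48, 58, 65, 91, 95, 96, 97, 123)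
def pvBounds : List Int := [48, 58, 65, 91, 95, 96, 97, 123]

-- the for-loop of _rank with its accumulator r
def rankLoop (x : Int) : List Int → Int → Int
  | [], r => r
  | t :: ts, r => rankLoop x ts (if t ≤ x then r + 1 else r)

def pyRank (x : Int) : Int := rankLoop x pvBounds 0

def is_valid_bytes_alt (bClassname : Option (List Int)) : Bool :=
  match bClassname with
  | none => false
  | some bs => bs.all (fun b => PySem.Int.mod (pyRank b) 2 == 1)

-- ===== PRECONDITION & SPEC =====
def Spec_is_valid_bytes (bClassname : Option (List Int)) (out : Bool) : Prop := out = is_valid_bytes_alt bClassname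
instance (bClassname : Option (List Int)) (out : Bool) : Decidable (Spec_is_valid_bytes bClassname out) := by unfold Spec_is_valid_bytes; infer_instance

-- ===== CLAIM (what is proved, stated in full; the proofs are below) =====
def Claim_equal_is_valid_bytes : Prop := ∀ (bClassname : Option (List Int)), Dom_is_valid_bytes bClassname → Spec_is_valid_bytes bClassname (is_valid_bytes bClassname)

-- ===== LEMMAS AND PROOFS =====

lemma rankLoop_shift (x : Int) (ts : List Int) (r : Int) :
    rankLoop x ts r = r + rankLoop x ts 0 := by
  induction ts generalizing r with
  | nil => simp [rankLoop]
  | cons t ts ih =>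
    show rankLoop x ts (if t ≤ x then r + 1 else r) = r + rankLoop x ts (if t ≤ x then 0 + 1 else 0)
    rw [ih, ih (if t ≤ x then 0 + 1 else 0)]
    split_ifs <;> ring

lemma rankLoop_cons (x t : Int) (ts : List Int) :
    rankLoop x (t :: ts) 0 = (if t ≤ x then 1 else 0) + rankLoop x ts 0 := by
  show rankLoop x ts (if t ≤ x then 0 + 1 else 0) = _
  rw [rankLoop_shift]
  split_ifs <;> ring

lemma rank_flat (x : Int) : pyRank x =
    (if 48 ≤ x then 1 else 0) + ((if 58 ≤ x then 1 else 0) + ((if 65 ≤ x then 1 else 0) +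
    ((if 91 ≤ x then 1 else 0) + ((if 95 ≤ x then 1 else 0) + ((if 96 ≤ x then 1 else 0) +
    ((if 97 ≤ x then 1 else 0) + (if 123 ≤ x then 1 else 0))))))) := by
  show rankLoop x pvBounds 0 = _
  rw [pvBounds, rankLoop_cons, rankLoop_cons, rankLoop_cons, rankLoop_cons, rankLoop_cons,
    rankLoop_cons, rankLoop_cons, rankLoop_cons]
  norm_num [rankLoop]

lemma elt_eq (b : Int) :
    (PySem.Int.mod (pyRank b) 2 == 1) =
      ((65 ≤ b && b ≤ 90) || (97 ≤ b && b ≤ 122) || (48 ≤ b && b ≤ 57) || (b == 95)) := by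
  have h : PySem.Int.mod (pyRank b) 2 = (pyRank b) % 2 := PySem.Int.mod_eq_emod_of_pos (by norm_num)
  rw [Bool.eq_iff_iff, h, rank_flat]
  simp only [beq_iff_eq, Bool.or_eq_true, Bool.and_eq_true, decide_eq_true_eq]
  split_ifs <;> omega

lemma loop_eq (bs : List Int) :
    isValidLoop bs = bs.all (fun b => PySem.Int.mod (pyRank b) 2 == 1) := by
  induction bs with
  | nil => rfl
  | cons b rest ih =>
    rw [List.all_cons, elt_eq, isValidLoop]
    by_cases h : ((65 ≤ b && b ≤ 90) || (97 ≤ b && b ≤ 122) || (48 ≤ b && b ≤ 57) || (b == 95)) = true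
    · rw [h, if_pos rfl, ih, Bool.true_and]
    · rw [Bool.not_eq_true] at h
      rw [h]
      simp

-- ===== VERDICT (by name: the statement is the Claim_ definition above) =====
theorem is_valid_bytes_spec : Claim_equal_is_valid_bytes := by
  intro bClassname _
  unfold Spec_is_valid_bytes is_valid_bytes is_valid_bytes_alt
  cases bClassname with
  | none => rfl
  | some bs => exact loop_eq bs
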